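-- pv_equiv track=rewrite | github.com/microavia/messgen | messgen/ts_generator.py | _extract_all_base_types
-- ===== SOURCE A (Python) =====
-- from typing import Dict, Set, List, Tuple
--
-- def _extract_all_base_types(field_type) -> List[str]:
--     base_types = []
--     stack = [field_type]
--     while stack:
--         current_type = stack.pop()
--         if current_type.endswith('[]'):
--             base_type = current_type[:-2]
--             stack.append(base_type)
--         elif '[' in current_type and current_type.endswith(']'):
--             base_type = current_type[:current_type.find('[')]
--             stack.append(base_type)
--         elif '{' in current_type and current_type.endswith('}'):
--             value_type = current_type[:current_type.find('{')]
--             key_type = current_type[current_type.find('{')+1:-1]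
--             stack.append(value_type)
--             stack.append(key_type)
--         else:
--             base_types.append(current_type)
--     return base_types
-- ===== SOURCE B (Python) =====
-- from typing import List
--
-- def _extract_all_base_types(field_type) -> List[str]:
--     # Recursive decomposition: one type string -> its list of base type names.
--     def rec(t):
--         if t.endswith('[]'):
--             return rec(t[:-2])
--         if '[' in t and t.endswith(']'):
--             return rec(t[:t.find('[')])
--         if '{' in t and t.endswith('}'):
--             i = t.find('{')
--             return rec(t[i + 1:-1]) + rec(t[:i])
--         return [t]
--     return rec(field_type)
-- ===== Notes on version B (the rewrite author's own statement) =====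
-- stated objective: simpler
-- what changed: Replaced A's explicit work-stack while-loop that accumulates results by pops/pushes with a direct recursive helper on the type string, concatenating the key-type results before the value-type results to match the stack's LIFO order.
import Mathlib
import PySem

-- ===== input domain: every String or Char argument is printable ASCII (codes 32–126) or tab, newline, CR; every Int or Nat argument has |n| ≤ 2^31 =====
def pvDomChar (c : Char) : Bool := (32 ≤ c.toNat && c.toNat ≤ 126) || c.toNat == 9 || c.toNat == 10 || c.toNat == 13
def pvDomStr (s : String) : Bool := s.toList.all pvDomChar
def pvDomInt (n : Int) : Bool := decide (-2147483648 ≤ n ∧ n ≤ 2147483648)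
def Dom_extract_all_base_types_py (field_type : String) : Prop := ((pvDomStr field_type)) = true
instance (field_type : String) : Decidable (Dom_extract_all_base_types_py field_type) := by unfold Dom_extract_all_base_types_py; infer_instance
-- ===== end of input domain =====

-- B replaces A's explicit work-stack loop by direct structural recursion on the type string (same branch tests); objective: simpler.

-- Termination helpers (cited by the ports' decreasing_by).
theorem pvLen_arr (t : List Char) (h : PySem.Chars.endswith t ['[', ']'] = true) :
    (PySem.List.slice t none (some (-2))).length < t.length := by
  have hs : ['[', ']'] <:+ t := (PySem.Chars.endswith_iff t _).mp h
  have h2 : 2 ≤ t.length := by simpa using hs.length_le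
  rw [PySem.List.slice_to_neg_ofNat t 2 (by omega)]
  simp [List.length_take]; omega

theorem pvFind_lt (t : List Char) (c : Char) (h : PySem.Chars.isIn [c] t = true) :
    0 ≤ PySem.Chars.find t [c] ∧ (PySem.Chars.find t [c]).toNat < t.length := by
  have hinf : [c] <:+: t := (PySem.Chars.isIn_iff_infix [c] t).mp h
  have h0 : 0 ≤ PySem.Chars.find t [c] := (PySem.Chars.find_nonneg_iff t [c]).mpr hinf
  have hle : PySem.Chars.find t [c] ≤ t.length := PySem.Chars.find_le_length t [c]
  have hpre := (PySem.Chars.find_spec h0).1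
  have h1 : 1 ≤ (t.drop (PySem.Chars.find t [c]).toNat).length := by
    simpa using hpre.length_le
  simp [List.length_drop] at h1
  omega

theorem pvLen_pref (t : List Char) (c : Char) (h : PySem.Chars.isIn [c] t = true) :
    (PySem.List.slice t none (some (PySem.Chars.find t [c]))).length = (PySem.Chars.find t [c]).toNat := by
  obtain ⟨h0, hlt⟩ := pvFind_lt t c h
  rw [PySem.List.slice_to t h0]
  simp [List.length_take]; omega

theorem pvLen_map (t : List Char) (h1 : PySem.Chars.isIn ['{'] t = true)
    (h2 : PySem.Chars.endswith t ['}'] = true) :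
    (PySem.List.slice t (some (PySem.Chars.find t ['{'] + 1)) (some (-1))).length
      + (PySem.List.slice t none (some (PySem.Chars.find t ['{']))).length < t.length := by
  obtain ⟨h0, hlt⟩ := pvFind_lt t '{' h1
  have hlen1 : 1 ≤ t.length := by
    have hs : ['}'] <:+ t := (PySem.Chars.endswith_iff t _).mp h2
    simpa using hs.length_le
  rw [pvLen_pref t '{' h1, PySem.List.length_slice]
  have hc1 : PySem.List.clampIdx t.length (-1) = t.length - 1 := PySem.List.clampIdx_neg_one t.length
  have hc2 : PySem.List.clampIdx t.length (PySem.Chars.find t ['{'] + 1)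
      = min (PySem.Chars.find t ['{'] + 1).toNat t.length := by
    simp [PySem.List.clampIdx]; omega
  rw [hc1, hc2]; omega


theorem pvDecA1 (t b : List Char) (st : List (List Char)) (h : b.length < t.length) :
    2 * (List.map List.length (b :: st)).sum + (b :: st).length
      < 2 * (List.map List.length (t :: st)).sum + (t :: st).length := by
  simp; omega

theorem pvDecA3 (t k v : List Char) (st : List (List Char)) (h : k.length + v.length < t.length) :
    2 * (List.map List.length (k :: v :: st)).sum + (k :: v :: st).length
      < 2 * (List.map List.length (t :: st)).sum + (t :: st).length := by
  simp; omega

theorem pvDecA4 (t : List Char) (st : List (List Char)) :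
    2 * (List.map List.length st).sum + st.length
      < 2 * (List.map List.length (t :: st)).sum + (t :: st).length := by
  simp; omega

theorem pvDecB2 (t : List Char) (h : PySem.Chars.isIn ['['] t = true) :
    (PySem.List.slice t none (some (PySem.Chars.find t ['[']))).length < t.length := by
  rw [pvLen_pref t '[' h]; exact (pvFind_lt t '[' h).2

theorem pvDecB3k (t : List Char) (h1 : PySem.Chars.isIn ['{'] t = true)
    (h2 : PySem.Chars.endswith t ['}'] = true) :
    (PySem.List.slice t (some (PySem.Chars.find t ['{'] + 1)) (some (-1))).length < t.length := by
  have := pvLen_map t h1 h2; omega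

theorem pvDecB3v (t : List Char) (h1 : PySem.Chars.isIn ['{'] t = true)
    (h2 : PySem.Chars.endswith t ['}'] = true) :
    (PySem.List.slice t none (some (PySem.Chars.find t ['{']))).length < t.length := by
  have := pvLen_map t h1 h2; omega

-- ===== PORT A =====
-- A's while-loop over a Python list 'stack' (pop/append at the END) is ported with the stack
-- reversed: head of the Lean list = top of the Python stack; strings are carried as List Char.
def pvLoopA : List (List Char) → List (List Char) → List (List Char)
  | [], acc => acc
  | t :: st, acc =>
    if h1 : PySem.Chars.endswith t ['[', ']'] = true then
      pvLoopA (PySem.List.slice t none (some (-2)) :: st) acc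
    else if h2 : PySem.Chars.isIn ['['] t = true ∧ PySem.Chars.endswith t [']'] = true then
      pvLoopA (PySem.List.slice t none (some (PySem.Chars.find t ['['])) :: st) acc
    else if h3 : PySem.Chars.isIn ['{'] t = true ∧ PySem.Chars.endswith t ['}'] = true then
      -- push value_type, then key_type (key ends on top)
      pvLoopA (PySem.List.slice t (some (PySem.Chars.find t ['{'] + 1)) (some (-1))
                 :: PySem.List.slice t none (some (PySem.Chars.find t ['{'])) :: st) acc
    else
      pvLoopA st (acc ++ [t])
termination_by st _ => 2 * (st.map List.length).sum + st.length
decreasing_by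
  · exact pvDecA1 t _ st (pvLen_arr t h1)
  · exact pvDecA1 t _ st (pvDecB2 t h2.1)
  · exact pvDecA3 t _ _ st (pvLen_map t h3.1 h3.2)
  · exact pvDecA4 t st

def extract_all_base_types_py (field_type : String) : List String :=
  (pvLoopA [field_type.toList] []).map String.ofList

-- ===== PORT B =====
def pvRecB (t : List Char) : List (List Char) :=
  if h1 : PySem.Chars.endswith t ['[', ']'] = true then
    pvRecB (PySem.List.slice t none (some (-2)))
  else if h2 : PySem.Chars.isIn ['['] t = true ∧ PySem.Chars.endswith t [']'] = true then
    pvRecB (PySem.List.slice t none (some (PySem.Chars.find t ['['])))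
  else if h3 : PySem.Chars.isIn ['{'] t = true ∧ PySem.Chars.endswith t ['}'] = true then
    pvRecB (PySem.List.slice t (some (PySem.Chars.find t ['{'] + 1)) (some (-1)))
      ++ pvRecB (PySem.List.slice t none (some (PySem.Chars.find t ['{'])))
  else
    [t]
termination_by t.length
decreasing_by
  · exact pvLen_arr t h1
  · exact pvDecB2 t h2.1
  · exact pvDecB3k t h3.1 h3.2
  · exact pvDecB3v t h3.1 h3.2

def extract_all_base_types_py_alt (field_type : String) : List String :=
  (pvRecB field_type.toList).map String.ofList

-- ===== PRECONDITION & SPEC =====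
def Spec_extract_all_base_types_py (field_type : String) (out : List String) : Prop := out = extract_all_base_types_py_alt field_type
instance (field_type : String) (out : List String) : Decidable (Spec_extract_all_base_types_py field_type out) := by unfold Spec_extract_all_base_types_py; infer_instance

-- ===== CLAIM (what is proved, stated in full; the proofs are below) =====
def Claim_equal_extract_all_base_types_py : Prop := ∀ (field_type : String), Dom_extract_all_base_types_py field_type → Spec_extract_all_base_types_py field_type (extract_all_base_types_py field_type)

-- ===== LEMMAS AND PROOFS =====

-- The stack loop computes, over the remaining stack, the concatenation of B's recursions.
theorem pvLoopA_eq (st : List (List Char)) (acc : List (List Char)) :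
    pvLoopA st acc = acc ++ st.flatMap pvRecB := by
  induction st, acc using pvLoopA.induct with
  | case1 acc => simp [pvLoopA]
  | case2 t st acc h1 ih =>
      rw [pvLoopA, dif_pos h1, ih]
      conv_rhs => rw [List.flatMap_cons, pvRecB.eq_def]
      rw [dif_pos h1]; simp
  | case3 t st acc h1 h2 ih =>
      rw [pvLoopA, dif_neg h1, dif_pos h2, ih]
      conv_rhs => rw [List.flatMap_cons, pvRecB.eq_def]
      rw [dif_neg h1, dif_pos h2]; simp
  | case4 t st acc h1 h2 h3 ih =>
      rw [pvLoopA, dif_neg h1, dif_neg h2, dif_pos h3, ih]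
      conv_rhs => rw [List.flatMap_cons, pvRecB.eq_def]
      rw [dif_neg h1, dif_neg h2, dif_pos h3]; simp
  | case5 t st acc h1 h2 h3 ih =>
      rw [pvLoopA, dif_neg h1, dif_neg h2, dif_neg h3, ih]
      conv_rhs => rw [List.flatMap_cons, pvRecB.eq_def]
      rw [dif_neg h1, dif_neg h2, dif_neg h3]; simp

-- ===== VERDICT (by name: the statement is the Claim_ definition above) =====
theorem extract_all_base_types_py_spec : Claim_equal_extract_all_base_types_py := by
  intro ft _
  unfold Spec_extract_all_base_types_py extract_all_base_types_py extract_all_base_types_py_alt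
  rw [pvLoopA_eq]
  simp
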